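-- pv_equiv track=rewrite | github.com/jasperdiks1979-star/Getpawsy | engines/returns_v1/returns_engine.py | classify_return_reason
-- ===== SOURCE A (Python) =====
-- def classify_return_reason(description, image_analysis=None):
--     description_lower = description.lower()
--
--     if any(word in description_lower for word in ["broken", "defective", "doesn't work", "malfunction"]):
--         return "defective"
--     elif any(word in description_lower for word in ["wrong", "different", "not what i ordered"]):
--         return "wrong_item"
--     elif any(word in description_lower for word in ["damaged", "crushed", "torn"]):
--         return "damaged_in_shipping"
--     elif any(word in description_lower for word in ["small", "tiny", "too tight"]):
--         return "too_small"
--     elif any(word in description_lower for word in ["big", "large", "too loose"]):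
--         return "too_large"
--     elif any(word in description_lower for word in ["quality", "cheap", "poor"]):
--         return "quality_issue"
--     elif any(word in description_lower for word in ["mind", "changed", "don't want", "don't need"]):
--         return "changed_mind"
--     elif any(word in description_lower for word in ["pet", "dog", "cat", "doesn't like", "won't use"]):
--         return "pet_doesnt_like"
--     elif any(word in description_lower for word in ["described", "picture", "looks different"]):
--         return "not_as_described"
--
--     return "other"
-- ===== SOURCE B (Python) =====
-- GROUPS = [
--     ("defective", ["broken", "defective", "doesn't work", "malfunction"]),
--     ("wrong_item", ["wrong", "different", "not what i ordered"]),
--     ("damaged_in_shipping", ["damaged", "crushed", "torn"]),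
--     ("too_small", ["small", "tiny", "too tight"]),
--     ("too_large", ["big", "large", "too loose"]),
--     ("quality_issue", ["quality", "cheap", "poor"]),
--     ("changed_mind", ["mind", "changed", "don't want", "don't need"]),
--     ("pet_doesnt_like", ["pet", "dog", "cat", "doesn't like", "won't use"]),
--     ("not_as_described", ["described", "picture", "looks different"]),
-- ]
--
-- # flat keyword -> priority index, and the label table
-- KEYWORD_INDEX = [(w, i) for i, (_, ws) in enumerate(GROUPS) for w in ws]
-- LABELS = [label for label, _ in GROUPS]
--
--
-- def classify_return_reason(description, image_analysis=None):
--     # Exhaustively score every keyword against the description and return the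
--     # label of the minimum (highest-priority) matching index.
--     d = description.lower()
--     matched = [i for w, i in KEYWORD_INDEX if w in d]
--     return LABELS[min(matched)] if matched else "other"
-- ===== Notes on version B (the rewrite author's own statement) =====
-- stated objective: alternative
-- what changed: Instead of an ordered short-circuiting if/elif chain over keyword groups, B builds a flat keyword->priority index, exhaustively collects the priorities of ALL matching keywords, and returns the label at the minimum matched priority (argmin aggregation instead of first-match control flow).
import Mathlib
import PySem

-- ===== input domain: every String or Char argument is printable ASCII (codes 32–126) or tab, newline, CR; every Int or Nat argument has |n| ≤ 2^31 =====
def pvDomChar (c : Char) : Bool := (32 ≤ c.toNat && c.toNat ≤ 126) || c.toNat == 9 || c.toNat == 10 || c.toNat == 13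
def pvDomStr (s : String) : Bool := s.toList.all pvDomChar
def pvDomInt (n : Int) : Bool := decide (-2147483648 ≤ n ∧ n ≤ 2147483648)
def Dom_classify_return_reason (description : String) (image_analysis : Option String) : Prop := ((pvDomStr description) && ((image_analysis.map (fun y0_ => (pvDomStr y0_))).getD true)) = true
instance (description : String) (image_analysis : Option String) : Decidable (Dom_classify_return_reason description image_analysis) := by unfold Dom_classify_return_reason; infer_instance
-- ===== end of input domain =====

-- B replaces the short-circuiting if/elif chain by an exhaustive scan of a flat
-- keyword->priority index followed by an argmin over the matched priorities (alternative).
-- ===== PORT A =====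
def classify_return_reason (description : String) (image_analysis : Option String) : String :=
  let description_lower := PySem.Str.lower description
  if ["broken", "defective", "doesn't work", "malfunction"].any (fun word => PySem.Str.isIn word description_lower) then "defective"
  else if ["wrong", "different", "not what i ordered"].any (fun word => PySem.Str.isIn word description_lower) then "wrong_item"
  else if ["damaged", "crushed", "torn"].any (fun word => PySem.Str.isIn word description_lower) then "damaged_in_shipping"
  else if ["small", "tiny", "too tight"].any (fun word => PySem.Str.isIn word description_lower) then "too_small"
  else if ["big", "large", "too loose"].any (fun word => PySem.Str.isIn word description_lower) then "too_large"
  else if ["quality", "cheap", "poor"].any (fun word => PySem.Str.isIn word description_lower) then "quality_issue"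
  else if ["mind", "changed", "don't want", "don't need"].any (fun word => PySem.Str.isIn word description_lower) then "changed_mind"
  else if ["pet", "dog", "cat", "doesn't like", "won't use"].any (fun word => PySem.Str.isIn word description_lower) then "pet_doesnt_like"
  else if ["described", "picture", "looks different"].any (fun word => PySem.Str.isIn word description_lower) then "not_as_described"
  else "other"

-- ===== PORT B =====
def pvGroups : List (String × List String) :=
  [("defective", ["broken", "defective", "doesn't work", "malfunction"]),
   ("wrong_item", ["wrong", "different", "not what i ordered"]),
   ("damaged_in_shipping", ["damaged", "crushed", "torn"]),
   ("too_small", ["small", "tiny", "too tight"]),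
   ("too_large", ["big", "large", "too loose"]),
   ("quality_issue", ["quality", "cheap", "poor"]),
   ("changed_mind", ["mind", "changed", "don't want", "don't need"]),
   ("pet_doesnt_like", ["pet", "dog", "cat", "doesn't like", "won't use"]),
   ("not_as_described", ["described", "picture", "looks different"])]

-- KEYWORD_INDEX = [(w, i) for i, (_, ws) in enumerate(GROUPS) for w in ws]
def pvKwIndex : List (String × Int) :=
  (PySem.List.enumerate pvGroups).flatMap (fun p => p.2.2.map (fun w => (w, p.1)))

-- LABELS = [label for label, _ in GROUPS]
def pvLabels : List String := pvGroups.map Prod.fst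

def classify_return_reason_alt (description : String) (image_analysis : Option String) : String :=
  let d := PySem.Str.lower description
  let matched := (pvKwIndex.filter (fun wi => PySem.Str.isIn wi.1 d)).map (fun wi => wi.2)
  match PySem.List.min? matched (fun y => y) with
  | some m => (PySem.List.pyGet? pvLabels m).getD ""
  | none => "other"

-- ===== PRECONDITION & SPEC =====
def Spec_classify_return_reason (description : String) (image_analysis : Option String) (out : String) : Prop := out = classify_return_reason_alt description image_analysis
instance (description : String) (image_analysis : Option String) (out : String) : Decidable (Spec_classify_return_reason description image_analysis out) := by unfold Spec_classify_return_reason; infer_instance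

-- ===== CLAIM =====
def Claim_equal_classify_return_reason : Prop := ∀ (description : String) (image_analysis : Option String), Dom_classify_return_reason description image_analysis → Spec_classify_return_reason description image_analysis (classify_return_reason description image_analysis)

-- ===== LEMMAS AND PROOFS =====

-- the matched-priority list B builds, generalized over the group list and start index
def pvMatched (dl : String) (gs : List (String × List String)) (s : Int) : List Int :=
  (((PySem.List.enumerate gs s).flatMap (fun p => p.2.2.map (fun w => (w, p.1)))).filter
    (fun wi => PySem.Str.isIn wi.1 dl)).map (fun wi => wi.2)

-- index of the first group with a matching keyword (A's chain, as data)
def pvFirstHit (dl : String) : List (String × List String) → Int → Option Int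
  | [], _ => none
  | g :: gs, s => if g.2.any (fun w => PySem.Str.isIn w dl) then some s else pvFirstHit dl gs (s + 1)

theorem pvMatched_nil (dl : String) (s : Int) : pvMatched dl [] s = [] := rfl

theorem pvMatched_cons (dl : String) (g : String × List String) (gs : List (String × List String)) (s : Int) :
    pvMatched dl (g :: gs) s =
      (g.2.filter (fun w => PySem.Str.isIn w dl)).map (fun _ => s) ++ pvMatched dl gs (s + 1) := by
  simp only [pvMatched, PySem.List.enumerate_cons, List.flatMap_cons, List.filter_append,
    List.map_append, List.filter_map, List.map_map]
  rfl

theorem pvMatched_lb (dl : String) (gs : List (String × List String)) (s : Int) :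
    ∀ x ∈ pvMatched dl gs s, s ≤ x := by
  induction gs generalizing s with
  | nil => simp [pvMatched_nil]
  | cons g gs ih =>
    intro x hx
    rw [pvMatched_cons] at hx
    rcases List.mem_append.mp hx with h | h
    · rcases List.mem_map.mp h with ⟨w, _, rfl⟩; exact le_refl s
    · exact le_trans (by omega) (ih (s + 1) x h)

theorem pvFoldlMin_const (s : Int) (l : List Int) (h : ∀ x ∈ l, s ≤ x) : l.foldl min s = s := by
  induction l with
  | nil => rfl
  | cons a t ih =>
    have ha : s ≤ a := h a (by simp)
    simp only [List.foldl_cons, min_eq_left ha]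
    exact ih (fun x hx => h x (by simp [hx]))

theorem pvMin_matched (dl : String) (gs : List (String × List String)) (s : Int) :
    PySem.List.min? (pvMatched dl gs s) (fun y => y) = pvFirstHit dl gs s := by
  induction gs generalizing s with
  | nil => simp [pvMatched_nil, pvFirstHit, PySem.List.min?]
  | cons g gs ih =>
    rw [pvMatched_cons]
    by_cases h : g.2.any (fun w => PySem.Str.isIn w dl) = true
    · obtain ⟨w, hw, hq⟩ := List.any_eq_true.mp h
      rcases hf : g.2.filter (fun w => PySem.Str.isIn w dl) with _ | ⟨a, t⟩
      · exact absurd hq ((List.filter_eq_nil_iff.mp hf) w hw)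
      · simp only [List.map_cons, List.cons_append, PySem.List.min?_id_cons]
        rw [pvFoldlMin_const s _ (by
          intro x hx
          rcases List.mem_append.mp hx with h1 | h1
          · rcases List.mem_map.mp h1 with ⟨_, _, rfl⟩; exact le_refl s
          · exact le_trans (by omega) (pvMatched_lb dl gs (s + 1) x h1))]
        simp only [pvFirstHit]
        rw [if_pos h]
    · have hf : g.2.filter (fun w => PySem.Str.isIn w dl) = [] :=
        List.filter_eq_nil_iff.mpr (fun a ha => by
          intro hq; exact h (List.any_eq_true.mpr ⟨a, ha, hq⟩))
      simp only [hf, List.map_nil, List.nil_append]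
      rw [ih]
      simp only [pvFirstHit]
      rw [if_neg h]

-- ===== VERDICT =====
theorem classify_return_reason_spec : Claim_equal_classify_return_reason := by
  intro description image_analysis _
  unfold Spec_classify_return_reason
  have halt : classify_return_reason_alt description image_analysis =
      match pvFirstHit (PySem.Str.lower description) pvGroups 0 with
      | some m => (PySem.List.pyGet? pvLabels m).getD ""
      | none => "other" := by
    rw [← pvMin_matched]
    rfl
  rw [halt]
  unfold classify_return_reason
  simp only [pvGroups, pvFirstHit]
  norm_num only
  split_ifs <;> rfl
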